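-- pv_equiv track=rewrite | github.com/jorgearanda/advent-of-code-2023 | day15.py | get_boxes_hashmap
-- ===== SOURCE A (Python) =====
-- import contextlib
-- from collections import defaultdict
--
-- def hash(code):
--     res = 0
--     for char in code:
--         res += ord(char)
--         res *= 17
--         res %= 256
--     return res
--
-- def get_boxes_hashmap(sequence):
--     boxes = defaultdict(dict)
--     for code in sequence.split(","):
--         if "=" in code:
--             label, focal_length = code.split("=")
--             boxes[hash(label)][label] = int(focal_length)
--         else:
--             label = code[:-1]
--             with contextlib.suppress(KeyError):
--                 del boxes[hash(label)][label]
--     return boxes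
-- ===== SOURCE B (Python) =====
-- def hash(code):
--     res = 0
--     for char in code:
--         res = ((res + ord(char)) * 17) % 256
--     return res
--
-- def get_boxes_hashmap(sequence):
--     codes = sequence.split(",")
--     pairs = [(hash(code.split("=")[0] if "=" in code else code[:-1]), code) for code in codes]
--     groups = {}
--     for h, code in pairs:
--         groups[h] = groups.get(h, []) + [code]
--     boxes = {}
--     for h, cs in groups.items():
--         inner = {}
--         for code in cs:
--             if "=" in code:
--                 parts = code.split("=")
--                 inner[parts[0]] = int(parts[1])
--             else:
--                 inner.pop(code[:-1], None)
--         boxes[h] = inner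
--     return boxes
-- ===== Notes on version B (the rewrite author's own statement) =====
-- stated objective: alternative
-- what changed: A builds the boxes in one interleaved pass mutating a defaultdict of dicts; B first groups the codes by their target box hash in one pass, then replays each box's own codes independently to build its lens dict.
-- outside the precondition, e.g. on get_boxes_hashmap('='): A raises ValueError, B raises ValueError
import Mathlib
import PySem

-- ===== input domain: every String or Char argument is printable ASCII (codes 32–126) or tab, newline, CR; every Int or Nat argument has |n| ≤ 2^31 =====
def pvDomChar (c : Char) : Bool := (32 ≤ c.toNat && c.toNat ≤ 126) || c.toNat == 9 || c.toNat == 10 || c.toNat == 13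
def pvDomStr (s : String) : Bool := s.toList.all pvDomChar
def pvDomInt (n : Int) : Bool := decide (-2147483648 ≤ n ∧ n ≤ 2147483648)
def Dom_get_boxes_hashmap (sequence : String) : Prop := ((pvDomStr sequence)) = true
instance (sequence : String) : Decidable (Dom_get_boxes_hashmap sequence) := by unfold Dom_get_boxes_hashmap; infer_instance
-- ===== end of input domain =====

-- B restructures A's single interleaved pass into two passes (group the codes by target box, then
-- replay each box's codes independently): an alternative decomposition of the same cost.

-- ===== PORT A =====
-- s.split(sep) for a nonempty literal sep (split? is none only for sep = "")
def pySplit (s sep : String) : List String := (PySem.Str.split? s sep).getD []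

-- the module helper hash(code)
def pyhash (code : String) : Int :=
  code.toList.foldl (fun res char => PySem.Int.mod ((res + (char.toNat : Int)) * 17) 256) 0

def get_boxes_hashmap (sequence : String) : List (Int × List (String × Int)) :=
  let boxes : PySem.Dict Int (PySem.Dict String Int) :=
    (pySplit sequence ",").foldl (fun boxes code =>
      if PySem.Str.isIn "=" code then
        match pySplit code "=" with
        | [label, focal_length] =>
          match PySem.Int.ofStr? focal_length with
          | some n => boxes.modify (pyhash label) PySem.Dict.empty (fun inner => inner.insert label n)
          | none => boxes      -- int(focal_length) raises ValueError: excluded by Pre_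
        | _ => boxes           -- tuple unpacking raises ValueError: excluded by Pre_
      else
        let label := PySem.Str.slice code none (some (-1))
        boxes.modify (pyhash label) PySem.Dict.empty (fun inner => inner.erase label))
      PySem.Dict.empty
  boxes.items.map (fun p => (p.1, p.2.items))

-- ===== PORT B =====
def get_boxes_hashmap_alt (sequence : String) : List (Int × List (String × Int)) :=
  let codes := pySplit sequence ","
  let pairs := codes.map (fun code =>
    (pyhash (if PySem.Str.isIn "=" code then (pySplit code "=").getD 0 ""
             else PySem.Str.slice code none (some (-1))), code))
  let groups : PySem.Dict Int (List String) :=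
    pairs.foldl (fun groups p => groups.modify p.1 [] (fun cs => cs ++ [p.2])) PySem.Dict.empty
  groups.items.map (fun g => (g.1,
    (g.2.foldl (fun inner code =>
      if PySem.Str.isIn "=" code then
        let parts := pySplit code "="
        ((PySem.Int.ofStr? (parts.getD 1 "")).map
          (fun n => inner.insert (parts.getD 0 "") n)).getD inner
      else
        ((inner.pop? (PySem.Str.slice code none (some (-1)))).map
          (fun r => r.2)).getD inner) (PySem.Dict.empty : PySem.Dict String Int)).items))

-- ===== PRECONDITION & SPEC =====
-- Pre_ excludes exactly the inputs where A raises ValueError: a comma-piece containing '='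
-- must split into exactly two parts with an int()-parsable second part.
def Pre_get_boxes_hashmap (sequence : String) : Prop :=
  ∀ code ∈ pySplit sequence ",", PySem.Str.isIn "=" code = true →
    (pySplit code "=").length = 2 ∧
    (PySem.Int.ofStr? ((pySplit code "=").getD 1 "")).isSome = true
instance (sequence : String) : Decidable (Pre_get_boxes_hashmap sequence) := by
  unfold Pre_get_boxes_hashmap; infer_instance

def pvWitness_get_boxes_hashmap : String := "rn=1,cm-"

def Spec_get_boxes_hashmap (sequence : String) (out : List (Int × List (String × Int))) : Prop := out = get_boxes_hashmap_alt sequence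
instance (sequence : String) (out : List (Int × List (String × Int))) : Decidable (Spec_get_boxes_hashmap sequence out) := by unfold Spec_get_boxes_hashmap; infer_instance

-- ===== CLAIM (what is proved, stated in full; the proofs are below) =====
def Claim_equal_get_boxes_hashmap : Prop := ∀ (sequence : String), Dom_get_boxes_hashmap sequence → Pre_get_boxes_hashmap sequence → Spec_get_boxes_hashmap sequence (get_boxes_hashmap sequence)

-- ===== LEMMAS AND PROOFS =====

-- the box key both programs compute for a code
def keyOf (code : String) : Int :=
  pyhash (if PySem.Str.isIn "=" code then (pySplit code "=").getD 0 ""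
          else PySem.Str.slice code none (some (-1)))

-- the effect of one code on its own box (the common per-code semantics)
def uStep (inner : PySem.Dict String Int) (code : String) : PySem.Dict String Int :=
  if PySem.Str.isIn "=" code then
    match pySplit code "=" with
    | [label, focal] =>
      match PySem.Int.ofStr? focal with
      | some n => inner.insert label n
      | none => inner
    | _ => inner
  else inner.erase (PySem.Str.slice code none (some (-1)))

theorem erase_of_pop?_eq_none {ν : Type} (d : PySem.Dict String ν) (k : String)
    (h : d.pop? k = none) : d.erase k = d := by
  simp only [PySem.Dict.pop?, Option.map_eq_none_iff] at h
  have hk : k ∉ d.keys := by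
    rw [← PySem.Dict.get?_eq_none_iff_not_mem_keys]; exact h
  ext1
  simp only [PySem.Dict.erase]
  rw [List.filter_eq_self]
  intro p hp
  have hm : p.1 ∈ d.keys := List.mem_map_of_mem hp
  simp only [Bool.not_eq_eq_eq_not, Bool.not_true, beq_eq_false_iff_ne, ne_eq]
  rintro rfl; exact hk hm

theorem snd_of_pop?_eq_some {ν : Type} (d : PySem.Dict String ν) (k : String)
    (r : ν × PySem.Dict String ν) (h : d.pop? k = some r) : r.2 = d.erase k := by
  simp only [PySem.Dict.pop?, Option.map_eq_some_iff] at h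
  obtain ⟨v, _, rfl⟩ := h
  rfl

-- B's inner loop body, on a well-formed code, is uStep
theorem stepB_eq_uStep (inner : PySem.Dict String Int) (code : String)
    (hc : PySem.Str.isIn "=" code = true →
      (pySplit code "=").length = 2 ∧
      (PySem.Int.ofStr? ((pySplit code "=").getD 1 "")).isSome = true) :
    (if PySem.Str.isIn "=" code then
        let parts := pySplit code "="
        ((PySem.Int.ofStr? (parts.getD 1 "")).map
          (fun n => inner.insert (parts.getD 0 "") n)).getD inner
      else
        ((inner.pop? (PySem.Str.slice code none (some (-1)))).map
          (fun r => r.2)).getD inner) = uStep inner code := by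
  unfold uStep
  by_cases h : PySem.Str.isIn "=" code = true
  · obtain ⟨hl, hs⟩ := hc h
    obtain ⟨a, b, hab⟩ := List.length_eq_two.mp hl
    obtain ⟨n, hn⟩ := Option.isSome_iff_exists.mp hs
    simp only [h, if_true, hab, List.getD] at *
    simp only [List.getElem?_cons_succ, List.getElem?_cons_zero, Option.getD_some] at hn
    simp [hn]
  · simp only [Bool.not_eq_true] at h
    simp only [h, Bool.false_eq_true, if_false]
    cases hp : inner.pop? (PySem.Str.slice code none (some (-1))) with
    | none =>
      simp only [Option.map_none, Option.getD_none]
      exact (erase_of_pop?_eq_none inner _ hp).symm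
    | some r =>
      simp only [Option.map_some, Option.getD_some]
      exact snd_of_pop?_eq_some inner _ r hp

-- A's loop body, on a well-formed code, is "modify this code's box by uStep"
theorem stepA_eq_modify (code : String)
    (hc : PySem.Str.isIn "=" code = true →
      (pySplit code "=").length = 2 ∧
      (PySem.Int.ofStr? ((pySplit code "=").getD 1 "")).isSome = true)
    (d : PySem.Dict Int (PySem.Dict String Int)) :
    (if PySem.Str.isIn "=" code then
        match pySplit code "=" with
        | [label, focal_length] =>
          match PySem.Int.ofStr? focal_length with
          | some n => d.modify (pyhash label) PySem.Dict.empty (fun inner => inner.insert label n)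
          | none => d
        | _ => d
      else
        let label := PySem.Str.slice code none (some (-1))
        d.modify (pyhash label) PySem.Dict.empty (fun inner => inner.erase label))
      = d.modify (keyOf code) PySem.Dict.empty (fun inner => uStep inner code) := by
  unfold keyOf uStep
  by_cases h : PySem.Str.isIn "=" code = true
  · obtain ⟨hl, hs⟩ := hc h
    obtain ⟨a, b, hab⟩ := List.length_eq_two.mp hl
    obtain ⟨n, hn⟩ := Option.isSome_iff_exists.mp hs
    simp only [h, if_true, hab, List.getD] at *
    simp only [List.getElem?_cons_succ, List.getElem?_cons_zero, Option.getD_some] at hn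
    simp [hn]
  · simp only [h, Bool.false_eq_true, if_false]

-- the key fact about an interleaved "modify each element's own bucket" loop:
-- each bucket's final value replays exactly that bucket's elements, in order
theorem getD_foldl_modify_filter {κ ν β : Type} [BEq κ] [LawfulBEq κ]
    (l : List β) (key : β → κ) (ε : ν) (u : ν → β → ν) (d : PySem.Dict κ ν) (h : κ) :
    (l.foldl (fun d c => d.modify (key c) ε (fun x => u x c)) d).getD h ε
      = (l.filter (fun c => key c == h)).foldl u (d.getD h ε) := by
  induction l generalizing d with
  | nil => rfl
  | cons c l ih =>
    simp only [List.foldl_cons, List.filter_cons]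
    by_cases hc : key c = h
    · subst hc
      simp only [BEq.rfl, if_true, List.foldl_cons, ih, PySem.Dict.getD_modify_self]
    · have hbeq : (key c == h) = false := beq_eq_false_iff_ne.mpr hc
      simp only [hbeq, Bool.false_eq_true, if_false, ih,
        PySem.Dict.getD_modify_of_ne d ε _ (Ne.symm hc)]

-- ===== VERDICT (by name: the statement is the Claim_ definition above) =====
theorem get_boxes_hashmap_spec : Claim_equal_get_boxes_hashmap := by
  intro sequence _hdom hpre
  unfold Spec_get_boxes_hashmap get_boxes_hashmap get_boxes_hashmap_alt
  dsimp only
  --名 the pieces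
  have hA1 : (pySplit sequence ",").foldl (fun boxes code =>
      if PySem.Str.isIn "=" code then
        match pySplit code "=" with
        | [label, focal_length] =>
          match PySem.Int.ofStr? focal_length with
          | some n => boxes.modify (pyhash label) PySem.Dict.empty (fun inner => inner.insert label n)
          | none => boxes
        | _ => boxes
      else
        let label := PySem.Str.slice code none (some (-1))
        boxes.modify (pyhash label) PySem.Dict.empty (fun inner => inner.erase label))
      PySem.Dict.empty
      = (pySplit sequence ",").foldl
          (fun d c => d.modify (keyOf c) PySem.Dict.empty (fun x => uStep x c)) PySem.Dict.empty := by
    apply PySem.List.foldl_congr_mem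
    intro d c hc
    exact stepA_eq_modify c (hpre c hc) d
  rw [hA1]
  set codes := pySplit sequence "," with hcodes
  set DA := codes.foldl
      (fun d c => d.modify (keyOf c) PySem.Dict.empty (fun x => uStep x c)) PySem.Dict.empty with hDA
  set pairs := codes.map (fun code =>
    (pyhash (if PySem.Str.isIn "=" code then (pySplit code "=").getD 0 ""
             else PySem.Str.slice code none (some (-1))), code)) with hpairs
  set G := pairs.foldl (fun groups p => groups.modify p.1 [] (fun cs => cs ++ [p.2]))
      PySem.Dict.empty with hG
  have hpairs' : pairs = codes.map (fun code => (keyOf code, code)) := by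
    simp only [hpairs, keyOf]
  have hAnodup : DA.keys.Nodup := by
    rw [hDA]
    exact PySem.Dict.nodup_keys_foldl_modify_key codes keyOf PySem.Dict.empty
      (fun _ c => fun x => uStep x c) PySem.Dict.empty (by simp)
  have hBnodup : G.keys.Nodup := by
    rw [hG]
    exact PySem.Dict.nodup_keys_foldl_modify_key pairs (fun p => p.1) []
      (fun _ p => fun cs => cs ++ [p.2]) PySem.Dict.empty (by simp)
  have hAkeys : DA.keys = PySem.Set.update [] (codes.map keyOf) := by
    rw [hDA, PySem.Dict.keys_foldl_modify_key codes keyOf PySem.Dict.empty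
      (fun _ c => fun x => uStep x c) PySem.Dict.empty]
    simp
  have hBkeys : G.keys = PySem.Set.update [] (codes.map keyOf) := by
    rw [hG, PySem.Dict.keys_foldl_modify_key pairs (fun p => p.1) []
      (fun _ p => fun cs => cs ++ [p.2]) PySem.Dict.empty]
    simp [hpairs', List.map_map, Function.comp_def]
  have hAgetD : ∀ h : Int, DA.getD h PySem.Dict.empty
      = (codes.filter (fun c => keyOf c == h)).foldl uStep PySem.Dict.empty := by
    intro h
    rw [hDA, getD_foldl_modify_filter codes keyOf PySem.Dict.empty uStep PySem.Dict.empty h]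
    simp
  have hBgetD : ∀ h : Int, G.getD h [] = codes.filter (fun c => keyOf c == h) := by
    intro h
    rw [hG, PySem.Dict.getD_foldl_modify_append pairs PySem.Dict.empty h]
    simp [hpairs', List.filter_map, List.map_map, Function.comp_def]
  rw [PySem.Dict.items_eq_map_keys DA hAnodup PySem.Dict.empty,
      PySem.Dict.items_eq_map_keys G hBnodup [], hAkeys, hBkeys,
      List.map_map, List.map_map]
  apply List.map_congr_left
  intro h _
  simp only [Function.comp_apply]
  rw [hAgetD h, hBgetD h]
  congr 1
  refine congrArg PySem.Dict.items ?_
  apply PySem.List.foldl_congr_mem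
  intro inner c hcmem
  exact (stepB_eq_uStep inner c (hpre c (List.mem_of_mem_filter hcmem))).symm
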